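-- pv_equiv track=rewrite | github.com/daniel-munro/puzzles | wreath.py | _all_patterns
-- ===== SOURCE A (Python) =====
-- from typing import Dict, Iterable, List, Optional, Set, Tuple
--
-- Color = str
--
-- Pattern = Tuple[Color, Color, Color, Color, Color]
--
-- def _all_patterns(colors: Iterable[Color]) -> List[Pattern]:
--     colors_list = list(colors)
--     patterns: List[Pattern] = []
--     for c in colors_list:
--         for n in colors_list:
--             for e in colors_list:
--                 for s in colors_list:
--                     for w in colors_list:
--                         patterns.append((c, n, e, s, w))
--     return patterns
-- ===== SOURCE B (Python) =====
-- def _all_patterns(colors):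
--     cl = list(colors)
--     pairs = [(a, b) for a in cl for b in cl]
--     triples = [(a, b, c) for (a, b) in pairs for c in cl]
--     return [(c, n, e, s, w) for (c, n) in pairs for (e, s, w) in triples]
-- ===== Notes on version B (the rewrite author's own statement) =====
-- stated objective: alternative
-- what changed: Replaces the five nested append loops by composing a precomputed pair product with a triple product (two flat products joined), instead of one 5-deep loop nest.
import Mathlib
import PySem

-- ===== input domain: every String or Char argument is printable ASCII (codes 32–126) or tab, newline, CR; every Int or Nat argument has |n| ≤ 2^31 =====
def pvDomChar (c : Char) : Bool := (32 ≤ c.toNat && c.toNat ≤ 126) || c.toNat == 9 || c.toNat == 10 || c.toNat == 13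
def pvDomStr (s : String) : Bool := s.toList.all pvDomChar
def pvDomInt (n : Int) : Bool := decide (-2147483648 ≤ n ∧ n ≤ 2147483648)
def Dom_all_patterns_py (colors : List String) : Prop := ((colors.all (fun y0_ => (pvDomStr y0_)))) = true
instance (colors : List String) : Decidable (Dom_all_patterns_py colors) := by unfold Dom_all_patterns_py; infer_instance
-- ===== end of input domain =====

-- ===== PORT A =====
-- B composes a precomputed pair product with a triple product instead of A's five nested loops; alternative decomposition, same cost.
def all_patterns_py (colors : List String) : List (String × String × String × String × String) :=
  colors.foldl (fun acc c =>
    colors.foldl (fun acc n =>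
      colors.foldl (fun acc e =>
        colors.foldl (fun acc s =>
          colors.foldl (fun acc w => acc ++ [(c, n, e, s, w)]) acc) acc) acc) acc) []

-- ===== PORT B =====
def all_patterns_py_alt (colors : List String) : List (String × String × String × String × String) :=
  let pairs := colors.flatMap (fun a => colors.map (fun b => (a, b)))
  let triples := pairs.flatMap (fun p => colors.map (fun c => (p.1, p.2, c)))
  pairs.flatMap (fun p => triples.map (fun t => (p.1, p.2, t.1, t.2.1, t.2.2)))

-- ===== PRECONDITION & SPEC =====
def Spec_all_patterns_py (colors : List String) (out : List (String × String × String × String × String)) : Prop := out = all_patterns_py_alt colors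
instance (colors : List String) (out : List (String × String × String × String × String)) : Decidable (Spec_all_patterns_py colors out) := by unfold Spec_all_patterns_py; infer_instance

-- ===== CLAIM (what is proved, stated in full; the proofs are below) =====
def Claim_equal_all_patterns_py : Prop := ∀ (colors : List String), Dom_all_patterns_py colors → Spec_all_patterns_py colors (all_patterns_py colors)

-- ===== LEMMAS AND PROOFS =====

-- ===== VERDICT (by name: the statement is the Claim_ definition above) =====
theorem all_patterns_py_spec : Claim_equal_all_patterns_py := by
  intro colors _
  unfold Spec_all_patterns_py all_patterns_py all_patterns_py_alt
  simp only [PySem.List.foldl_append_singleton_eq_map, PySem.List.foldl_append_eq_flatMap,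
    List.nil_append, List.flatMap_assoc, List.flatMap_map, List.map_flatMap, List.map_map, Function.comp_def]
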